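-- pv_equiv track=rewrite | github.com/twajothi/Leetcodes | missingElement.py | solution
-- ===== SOURCE A (Python) =====
-- def solution(A):
-- 	if A[-1] !=len(A):
-- 		return len(A)
-- 	elif A[0] !=0:
-- 		return 0
-- 	else:
-- 		for i in range(1, len(A)):
-- 			if A[i]!=A[i-1] + 1:
-- 				return A[i-1] + 1
-- ===== SOURCE B (Python) =====
-- def first_gap(A, lo, hi):
--     # first value A[i] + 1 with lo <= i < hi and A[i+1] != A[i] + 1, else None
--     if lo >= hi:
--         return None
--     if hi == lo + 1:
--         return A[lo] + 1 if A[hi] != A[lo] + 1 else None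
--     mid = (lo + hi) // 2
--     left = first_gap(A, lo, mid)
--     return left if left is not None else first_gap(A, mid, hi)
--
-- def solution(A):
--     n = len(A)
--     if A[-1] != n:
--         return n
--     if A[0] != 0:
--         return 0
--     return first_gap(A, 0, n - 1)
-- ===== Notes on version B (the rewrite author's own statement) =====
-- stated objective: alternative
-- what changed: B replaces A's left-to-right index loop by a recursive divide-and-conquer over index ranges that splits at the midpoint and combines the halves by 'leftmost gap wins', correct because the first adjacent gap of [lo,hi] is the first gap of [lo,mid] if any, else the first gap of [mid,hi].
import Mathlib
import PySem

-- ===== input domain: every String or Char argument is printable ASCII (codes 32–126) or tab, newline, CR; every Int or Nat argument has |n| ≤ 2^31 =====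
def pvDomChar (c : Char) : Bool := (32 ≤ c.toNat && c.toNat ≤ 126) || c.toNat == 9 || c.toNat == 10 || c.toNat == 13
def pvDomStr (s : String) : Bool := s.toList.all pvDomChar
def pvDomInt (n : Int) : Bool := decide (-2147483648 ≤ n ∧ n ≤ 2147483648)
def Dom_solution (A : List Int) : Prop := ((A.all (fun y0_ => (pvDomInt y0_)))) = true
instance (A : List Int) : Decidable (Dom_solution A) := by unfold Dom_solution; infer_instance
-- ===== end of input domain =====

-- B replaces A's left-to-right index loop by a recursive divide-and-conquer over
-- index ranges, combining halves by 'leftmost gap wins' (objective: alternative).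

-- ===== PORT A =====
-- the 'for i in range(1, len(A))' loop: early-exit recursion over the index list
def solutionGap (A : List Int) : List Int → Option Int
  | [] => none
  | i :: rest =>
    match PySem.List.pyGet? A i, PySem.List.pyGet? A (i - 1) with
    | some ai, some prev => if ai ≠ prev + 1 then some (prev + 1) else solutionGap A rest
    | _, _ => none

def solution (A : List Int) : Option Int :=
  match PySem.List.pyGet? A (-1) with
  | none => none   -- A[-1] raises IndexError on []: outside Pre_solution
  | some last =>
    if last ≠ (A.length : Int) then some (A.length : Int)
    else
      match PySem.List.pyGet? A 0 with
      | none => none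
      | some a0 =>
        if a0 ≠ 0 then some 0
        else solutionGap A (PySem.List.pyRange 1 (A.length : Int) 1)


-- ===== PORT B =====
-- first_gap(A, lo, hi): divide and conquer at mid = (lo+hi)//2, left gap wins
-- (Python's local 'mid' is inlined at its two uses)
def firstGap (A : List Int) (lo hi : Int) : Option Int :=
  if _h1 : hi ≤ lo then none
  else if _h2 : hi = lo + 1 then
    match PySem.List.pyGet? A lo, PySem.List.pyGet? A hi with
    | some p, some x => if x ≠ p + 1 then some (p + 1) else none
    | _, _ => none   -- indexing guard; in-range at every call solution_alt makes
  else
    match firstGap A lo (PySem.Int.floordiv (lo + hi) 2) with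
    | some v => some v
    | none => firstGap A (PySem.Int.floordiv (lo + hi) 2) hi
termination_by (hi - lo).toNat
decreasing_by
  · have := PySem.Int.floordiv_eq_ediv_of_pos (a := lo + hi) (b := 2) (by omega)
    omega
  · have := PySem.Int.floordiv_eq_ediv_of_pos (a := lo + hi) (b := 2) (by omega)
    omega

def solution_alt (A : List Int) : Option Int :=
  match PySem.List.pyGet? A (-1), PySem.List.pyGet? A 0 with
  | some last, some a0 =>
    if last ≠ (A.length : Int) then some (A.length : Int)
    else if a0 ≠ 0 then some 0
    else firstGap A 0 ((A.length : Int) - 1)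
  | _, _ => none   -- A[-1] raises IndexError on []: outside Pre_solution

-- ===== PRECONDITION & SPEC =====
-- A[-1] raises IndexError on the empty list; Pre_ excludes exactly that input.
def Pre_solution (A : List Int) : Prop := A ≠ []
instance (A : List Int) : Decidable (Pre_solution A) := by unfold Pre_solution; infer_instance
def pvWitness_solution : List Int := [0, 1, 3, 4]

def Spec_solution (A : List Int) (out : Option Int) : Prop := out = solution_alt A
instance (A : List Int) (out : Option Int) : Decidable (Spec_solution A out) := by unfold Spec_solution; infer_instance

-- ===== CLAIM =====
def Claim_equal_solution : Prop := ∀ (A : List Int), Dom_solution A → Pre_solution A → Spec_solution A (solution A)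

-- ===== LEMMAS AND PROOFS =====

lemma pyGet?_some (A : List Int) (i : Int) (h0 : 0 ≤ i) (h : i < (A.length : Int)) :
    ∃ v, PySem.List.pyGet? A i = some v := by
  have hq : PySem.List.pyGet? A i = A[i.toNat]? := by
    conv_lhs => rw [show i = ((i.toNat : Nat) : Int) by omega]
    exact PySem.List.pyGet?_natCast A i.toNat
  obtain ⟨v, hv⟩ : ∃ v, A[i.toNat]? = some v :=
    ⟨_, List.getElem?_eq_getElem (by omega)⟩
  exact ⟨v, by rw [hq, hv]⟩

-- linear reference scan over the k pairs (lo,lo+1), ..., (lo+k-1,lo+k)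
def lin (A : List Int) : Int → Nat → Option Int
  | _, 0 => none
  | lo, k + 1 =>
    match PySem.List.pyGet? A lo, PySem.List.pyGet? A (lo + 1) with
    | some p, some x => if x ≠ p + 1 then some (p + 1) else lin A (lo + 1) k
    | _, _ => none

lemma lin_split (A : List Int) : ∀ (m : Nat) (lo : Int) (k : Nat),
    0 ≤ lo → lo + m + k < (A.length : Int) →
    lin A lo (m + k) = match lin A lo m with
      | some v => some v
      | none => lin A (lo + m) k := by
  intro m
  induction m with
  | zero => intro lo k _ _; simp [lin]
  | succ m ih =>
    intro lo k h0 hlen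
    have hmk : m + 1 + k = (m + k) + 1 := by omega
    rw [hmk]
    obtain ⟨p, hp⟩ := pyGet?_some A lo h0 (by push_cast at hlen ⊢; omega)
    obtain ⟨x, hx⟩ := pyGet?_some A (lo + 1) (by omega) (by push_cast at hlen ⊢; omega)
    simp only [lin, hp, hx]
    by_cases hne : x = p + 1
    · simp only [hne, ne_eq, not_true_eq_false, if_false]
      rw [ih (lo + 1) k (by omega) (by push_cast at hlen ⊢; omega)]
      have : lo + 1 + (m : Int) = lo + ((m + 1 : Nat) : Int) := by push_cast; ring
      rw [this]
    · simp [hne]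

lemma firstGap_eq_lin (A : List Int) : ∀ (K : Nat) (lo hi : Int),
    (hi - lo).toNat ≤ K → 0 ≤ lo → hi < (A.length : Int) →
    firstGap A lo hi = lin A lo (hi - lo).toNat := by
  intro K
  induction K with
  | zero =>
    intro lo hi hK _ _
    have hle : hi ≤ lo := by omega
    rw [firstGap, dif_pos hle, (by omega : (hi - lo).toNat = 0)]
    rfl
  | succ K ih =>
    intro lo hi hK h0 hlen
    by_cases hle : hi ≤ lo
    · rw [firstGap, dif_pos hle, (by omega : (hi - lo).toNat = 0)]
      rfl
    · rw [firstGap, dif_neg hle]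
      by_cases hone : hi = lo + 1
      · rw [dif_pos hone, (by omega : (hi - lo).toNat = 1)]
        obtain ⟨p, hp⟩ := pyGet?_some A lo h0 (by omega)
        obtain ⟨x, hx⟩ := pyGet?_some A hi (by omega) hlen
        have hx' : PySem.List.pyGet? A (lo + 1) = some x := hone ▸ hx
        simp only [lin, hp, hx, hx']
      · rw [dif_neg hone]
        have hfd := PySem.Int.floordiv_eq_ediv_of_pos (a := lo + hi) (b := 2) (by omega)
        have hb : lo < PySem.Int.floordiv (lo + hi) 2 ∧ PySem.Int.floordiv (lo + hi) 2 < hi := by omega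
        rw [ih lo _ (by omega) h0 (by omega), ih _ hi (by omega) (by omega) hlen]
        rw [(by omega : (hi - lo).toNat =
              (PySem.Int.floordiv (lo + hi) 2 - lo).toNat + (hi - PySem.Int.floordiv (lo + hi) 2).toNat),
            lin_split A _ lo _ h0 (by omega)]
        have : lo + ((PySem.Int.floordiv (lo + hi) 2 - lo).toNat : Int) = PySem.Int.floordiv (lo + hi) 2 := by omega
        rw [this]

lemma solutionGap_eq_lin (A : List Int) : ∀ (K : Nat) (i : Int),
    ((A.length : Int) - i).toNat ≤ K → 1 ≤ i →
    solutionGap A (PySem.List.pyRange i (A.length : Int) 1) = lin A (i - 1) ((A.length : Int) - i).toNat := by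
  intro K
  induction K with
  | zero =>
    intro i hK hi
    rw [PySem.List.pyRange_one_eq_nil (by omega), (by omega : ((A.length : Int) - i).toNat = 0)]
    rfl
  | succ K ih =>
    intro i hK hi
    by_cases hlt : i < (A.length : Int)
    · rw [PySem.List.pyRange_one_cons hlt,
          (by omega : ((A.length : Int) - i).toNat = ((A.length : Int) - (i + 1)).toNat + 1)]
      simp only [solutionGap, lin]
      rw [(by ring : i - 1 + 1 = i)]
      cases PySem.List.pyGet? A i with
      | none => cases PySem.List.pyGet? A (i - 1) <;> rfl
      | some ai =>
        cases PySem.List.pyGet? A (i - 1) with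
        | none => rfl
        | some prev =>
          by_cases hne : ai = prev + 1
          · simp only [hne, ne_eq, not_true_eq_false, if_false]
            have := ih (i + 1) (by omega) (by omega)
            simpa using this
          · simp [hne]
    · rw [PySem.List.pyRange_one_eq_nil (by omega), (by omega : ((A.length : Int) - i).toNat = 0)]
      rfl

-- ===== VERDICT =====
theorem solution_spec : Claim_equal_solution := by
  intro A _ hpre
  unfold Spec_solution solution solution_alt
  obtain ⟨a, t, rfl⟩ : ∃ a t, A = a :: t := by
    cases A with
    | nil => exact absurd rfl hpre
    | cons a t => exact ⟨a, t, rfl⟩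
  have h0 : PySem.List.pyGet? (a :: t) (0 : Int) = some a := by simp [pysem]
  cases hlast : PySem.List.pyGet? (a :: t) (-1) with
  | none => rfl
  | some last =>
    simp only [h0]
    split_ifs with hL ha
    · rfl
    · rfl
    · rw [solutionGap_eq_lin (a :: t) (((a :: t).length : Int) - 1).toNat 1 (by omega) le_rfl,
          firstGap_eq_lin (a :: t) (((a :: t).length : Int) - 1).toNat 0 (((a :: t).length : Int) - 1)
            (by omega) le_rfl (by omega)]
      norm_num
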